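-- pv_equiv track=rewrite | github.com/colehanan1/personal-ai-agent | scripts/ask_from_phone.py | parse_message_prefix
-- ===== SOURCE A (Python) =====
-- from typing import Optional, Dict, Any, Tuple
--
-- def parse_message_prefix(message: str) -> Tuple[Optional[str], str]:
--     """
--     Parse message prefix to determine routing.
--
--     Supported prefixes:
--     - claude: Route to NEXUS (default)
--     - cortex: Route to CORTEX via NEXUS
--     - frontier: Route to FRONTIER via NEXUS
--     - plain: Direct pass-through
--     - status: System status check
--     - briefing: Generate briefing
--
--     Returns:
--         (prefix, query) tuple
--     """
--     message = message.strip()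
--
--     # Check for prefix patterns
--     prefixes = ["claude:", "cortex:", "frontier:", "plain:", "status:", "briefing:"]
--
--     for prefix in prefixes:
--         if message.lower().startswith(prefix):
--             prefix_name = prefix.rstrip(":")
--             query = message[len(prefix):].strip()
--             return prefix_name, query
--
--     # Default: route through claude (NEXUS)
--     return None, message
-- ===== SOURCE B (Python) =====
-- def parse_message_prefix(message):
--     """Tokenize once at the first colon and look the head up in a fixed set,
--     instead of testing six lowered startswith patterns."""
--     message = message.strip()
--     i = message.find(':')
--     if i != -1:
--         head = message[:i].lower()
--         if head in {'claude', 'cortex', 'frontier', 'plain', 'status', 'briefing'}: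
--             return head, message[i + 1:].strip()
--     return None, message
-- ===== Notes on version B (the rewrite author's own statement) =====
-- stated objective: idiomatic
-- what changed: B strips the message, tokenizes it once at its first colon with find/slice and looks the lowered head up in a fixed set of six names, instead of A's loop testing six lowered-startswith colon-suffixed patterns.
import Mathlib
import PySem

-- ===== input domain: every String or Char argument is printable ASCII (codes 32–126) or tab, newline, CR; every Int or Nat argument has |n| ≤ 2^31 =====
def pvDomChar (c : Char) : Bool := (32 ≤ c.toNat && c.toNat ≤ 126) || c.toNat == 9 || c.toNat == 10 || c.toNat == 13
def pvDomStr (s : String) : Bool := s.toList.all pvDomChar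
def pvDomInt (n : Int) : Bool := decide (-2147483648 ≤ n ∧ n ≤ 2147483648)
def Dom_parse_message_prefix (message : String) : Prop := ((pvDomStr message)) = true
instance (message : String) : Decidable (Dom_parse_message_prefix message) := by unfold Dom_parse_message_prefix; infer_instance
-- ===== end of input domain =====

-- B tokenizes the stripped message once at its first colon and looks the lowered head up
-- in a fixed name list, instead of A's six lowered-startswith scans; objective: idiomatic.

-- ===== PORT A =====
-- hand port of Python's str.rstrip(":"): drop trailing ':' characters (exact)
def pmpRstripColon (s : List Char) : List Char :=
  (s.reverse.dropWhile (fun c => c == ':')).reverse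

-- the 'for prefix in prefixes: if …: return …' loop
def pmpGo (m : List Char) : List (List Char) → Option String × String
  | [] => (none, String.ofList m)
  | p :: rest =>
    if PySem.Chars.startswith (PySem.Chars.lower m) p then
      (some (String.ofList (pmpRstripColon p)),
       String.ofList (PySem.Chars.strip (PySem.List.slice m (some (p.length : Int)) none)))
    else pmpGo m rest

def parse_message_prefix (message : String) : Option String × String :=
  let m := PySem.Chars.strip message.toList
  pmpGo m ["claude:".toList, "cortex:".toList, "frontier:".toList,
           "plain:".toList, "status:".toList, "briefing:".toList]

-- ===== PORT B =====
def pmpNames : List (List Char) :=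
  ["claude".toList, "cortex".toList, "frontier".toList,
   "plain".toList, "status".toList, "briefing".toList]

def parse_message_prefix_alt (message : String) : Option String × String :=
  let m := PySem.Chars.strip message.toList
  let i := PySem.Chars.find m [':']
  if i ≠ -1 then
    let head := PySem.Chars.lower (PySem.List.slice m none (some i))
    if pmpNames.contains head then
      (some (String.ofList head),
       String.ofList (PySem.Chars.strip (PySem.List.slice m (some (i + 1)) none)))
    else (none, String.ofList m)
  else (none, String.ofList m)

-- ===== PRECONDITION & SPEC =====
def Spec_parse_message_prefix (message : String) (out : Option String × String) : Prop := out = parse_message_prefix_alt message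
instance (message : String) (out : Option String × String) : Decidable (Spec_parse_message_prefix message out) := by unfold Spec_parse_message_prefix; infer_instance

-- ===== CLAIM (what is proved, stated in full; the proofs are below) =====
def Claim_equal_parse_message_prefix : Prop := ∀ (message : String), Dom_parse_message_prefix message → Spec_parse_message_prefix message (parse_message_prefix message)

-- ===== LEMMAS AND PROOFS =====

-- lowering a character can only produce ':' from ':'
theorem pmp_lowerChar_colon (c : Char) (h : PySem.Chars.lowerChar c = ':') : c = ':' := by
  unfold PySem.Chars.lowerChar at h
  split at h
  · rename_i hc
    simp only [PySem.Chars.isupper, Bool.and_eq_true, decide_eq_true_eq] at hc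
    have h65 : 65 ≤ c.toNat := hc.1
    have h90 : c.toNat ≤ 90 := hc.2
    have h2 := congrArg Char.toNat h
    rw [Char.toNat_ofNat] at h2
    have hcn : (':' : Char).toNat = 58 := rfl
    rw [hcn] at h2
    split at h2 <;> omega
  · exact h

theorem pmp_mem_colon_lower (cs : List Char) : ':' ∈ PySem.Chars.lower cs ↔ ':' ∈ cs := by
  simp only [PySem.Chars.lower, List.mem_map]
  constructor
  · rintro ⟨c, hc, hl⟩; rwa [pmp_lowerChar_colon c hl] at hc
  · intro h; exact ⟨':', h, rfl⟩

-- a singleton is an infix of every list containing it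
theorem pmp_singleton_infix (l : List Char) (a : Char) (h : a ∈ l) : [a] <:+: l := by
  obtain ⟨s, t, rfl⟩ := List.mem_iff_append.mp h
  exact ⟨s, t, by simp⟩

-- the block before the FIRST colon is unique
theorem pmp_firstColon : ∀ (a b x y : List Char), ':' ∉ a → ':' ∉ b →
    a ++ ':' :: x = b ++ ':' :: y → a = b := by
  intro a
  induction a with
  | nil =>
    intro b x y _ hb h
    cases b with
    | nil => rfl
    | cons c b' =>
      simp only [List.nil_append, List.cons_append, List.cons.injEq] at h
      exact absurd (h.1 ▸ List.mem_cons_self) hb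
  | cons c a' ih =>
    intro b x y ha hb h
    cases b with
    | nil =>
      simp only [List.cons_append, List.nil_append, List.cons.injEq] at h
      exact absurd (h.1 ▸ List.mem_cons_self) ha
    | cons d b' =>
      simp only [List.cons_append, List.cons.injEq] at h
      rw [h.1, ih b' x y (fun hm => ha (List.mem_cons_of_mem _ hm))
            (fun hm => hb (List.mem_cons_of_mem _ hm)) h.2]

theorem pmp_lower_split (h t : List Char) :
    PySem.Chars.lower (h ++ ':' :: t) =
      PySem.Chars.lower h ++ ':' :: PySem.Chars.lower t := by
  simp only [PySem.Chars.lower, List.map_append, List.map_cons]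
  rfl

-- A's startswith test on a decomposed message is exactly B's head comparison
theorem pmp_matchIff (name h t : List Char) (hh : ':' ∉ h) (hn : ':' ∉ name) :
    (PySem.Chars.startswith (PySem.Chars.lower (h ++ ':' :: t)) (name ++ [':']) = true)
      ↔ PySem.Chars.lower h = name := by
  rw [PySem.Chars.startswith_iff, pmp_lower_split]
  constructor
  · rintro ⟨s, hs⟩
    rw [List.append_assoc, List.singleton_append] at hs
    have hlh : ':' ∉ PySem.Chars.lower h := fun hm => hh ((pmp_mem_colon_lower h).mp hm)
    exact (pmp_firstColon name (PySem.Chars.lower h) s (PySem.Chars.lower t) hn hlh hs).symm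
  · intro he
    rw [he]
    exact ⟨PySem.Chars.lower t, by simp⟩

theorem pmp_rstrip_colon_name (n : List Char) (hn : ':' ∉ n) :
    pmpRstripColon (n ++ [':']) = n := by
  unfold pmpRstripColon
  rw [List.reverse_append]
  simp only [List.reverse_cons, List.reverse_nil, List.nil_append, List.cons_append,
    List.nil_append, List.dropWhile_cons, beq_self_eq_true, if_true]
  have : n.reverse.dropWhile (fun c => c == ':') = n.reverse := by
    cases hr : n.reverse with
    | nil => rfl
    | cons c l' =>
      rw [List.dropWhile_cons, if_neg]
      simp only [beq_iff_eq]
      intro he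
      apply hn
      rw [← List.mem_reverse, hr, he]
      exact List.mem_cons_self
  rw [this, List.reverse_reverse]

-- A's loop over colon-suffixed names ≡ one lookup of the lowered head, on a message
-- decomposed at its first colon
theorem pmp_go_names (h t : List Char) (hh : ':' ∉ h) :
    ∀ names : List (List Char), (∀ n ∈ names, ':' ∉ n) →
    pmpGo (h ++ ':' :: t) (names.map (fun n => n ++ [':'])) =
      (if names.contains (PySem.Chars.lower h) then
        (some (String.ofList (PySem.Chars.lower h)), String.ofList (PySem.Chars.strip t))
      else (none, String.ofList (h ++ ':' :: t))) := by
  intro names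
  induction names with
  | nil => intro _; simp [pmpGo]
  | cons n rest ih =>
    intro hns
    have hn : ':' ∉ n := hns n List.mem_cons_self
    rw [List.map_cons]
    simp only [pmpGo]
    by_cases hm : PySem.Chars.lower h = n
    · rw [if_pos ((pmp_matchIff n h t hh hn).mpr hm)]
      have hlen : (n ++ [':']).length = h.length + 1 := by
        have := congrArg List.length hm
        simp only [PySem.Chars.lower, List.length_map] at this
        simp [← this]
      have hsl : PySem.List.slice (h ++ ':' :: t) (some (((n ++ [':']).length : Nat) : Int)) none = t := by
        rw [PySem.List.slice_from _ (by positivity)]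
        rw [Int.toNat_natCast, hlen]
        have : h.length + 1 = h.length + 1 := rfl
        rw [show h.length + 1 = (h ++ [':']).length by simp]
        rw [show h ++ ':' :: t = (h ++ [':']) ++ t by simp]
        rw [List.drop_left]
      rw [hsl, pmp_rstrip_colon_name n hn]
      rw [if_pos (by simp [hm])]
      rw [hm]
    · rw [if_neg (by rw [pmp_matchIff n h t hh hn]; exact hm)]
      rw [ih (fun x hx => hns x (List.mem_cons_of_mem _ hx))]
      have : (n :: rest).contains (PySem.Chars.lower h) = rest.contains (PySem.Chars.lower h) := by
        simp only [List.contains_cons]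
        simp [beq_iff_eq]
        intro he
        exact absurd he hm
      rw [this]

theorem pmp_main (m : List Char) :
    pmpGo m ["claude:".toList, "cortex:".toList, "frontier:".toList,
             "plain:".toList, "status:".toList, "briefing:".toList] =
    (let i := PySem.Chars.find m [':']
     if i ≠ -1 then
       let head := PySem.Chars.lower (PySem.List.slice m none (some i))
       if pmpNames.contains head then
         (some (String.ofList head),
          String.ofList (PySem.Chars.strip (PySem.List.slice m (some (i + 1)) none)))
       else (none, String.ofList m)
     else (none, String.ofList m)) := by
  by_cases hneg : PySem.Chars.find m [':'] = -1
  · -- no colon in m: every startswith fails, B takes the else branch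
    have hnc : ':' ∉ m := by
      intro hm
      exact absurd (pmp_singleton_infix m ':' hm)
        ((PySem.Chars.find_eq_neg_one_iff m [':']).mp hneg)
    have hfail : ∀ p : List Char, ':' ∈ p →
        PySem.Chars.startswith (PySem.Chars.lower m) p = false := by
      intro p hp
      rw [Bool.eq_false_iff]
      intro hsw
      have := ((PySem.Chars.startswith_iff _ p).mp hsw).subset hp
      exact hnc ((pmp_mem_colon_lower m).mp this)
    simp only [pmpGo,
      hfail "claude:".toList (by decide), hfail "cortex:".toList (by decide),
      hfail "frontier:".toList (by decide), hfail "plain:".toList (by decide),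
      hfail "status:".toList (by decide), hfail "briefing:".toList (by decide),
      Bool.false_eq_true, if_false, hneg, ne_eq, not_true_eq_false]
  · -- m has a colon; decompose at the first one
    have h0 : 0 ≤ PySem.Chars.find m [':'] := by
      have := PySem.Chars.neg_one_le_find m [':']
      omega
    obtain ⟨hpre, hmin⟩ := PySem.Chars.find_spec h0
    set i := PySem.Chars.find m [':'] with hi
    set k := i.toNat with hk
    obtain ⟨s, hs⟩ := hpre
    rw [List.singleton_append] at hs
    have hklen : k < m.length := by
      have := congrArg List.length hs
      simp only [List.length_cons, List.length_drop] at this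
      omega
    have hdecomp : m = m.take k ++ ':' :: s := by
      conv_lhs => rw [← List.take_append_drop k m]
      rw [hs]
    have htl : (m.take k).length = k := by simp; omega
    have hnotin : ':' ∉ m.take k := by
      intro hm
      obtain ⟨j, hj, hje⟩ := List.getElem_of_mem hm
      have hjk : j < k := by rwa [htl] at hj
      apply hmin j hjk
      have hjm : j < m.length := by omega
      rw [List.drop_eq_getElem_cons hjm]
      have : m[j] = ':' := by rw [← hje]; simp [List.getElem_take]
      rw [this]
      exact ⟨m.drop (j + 1), by simp⟩
    have hslice_to : PySem.List.slice m none (some i) = m.take k :=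
      PySem.List.slice_to m h0
    have hslice_from : PySem.List.slice m (some (i + 1)) none = s := by
      rw [PySem.List.slice_from m (by omega)]
      have h1 : (i + 1).toNat = k + 1 := by omega
      rw [h1]
      conv_lhs => rw [hdecomp]
      rw [show k + 1 = (m.take k ++ [':']).length by simp [htl]]
      rw [show m.take k ++ ':' :: s = (m.take k ++ [':']) ++ s by simp]
      rw [List.drop_left]
    have hprefixes : ["claude:".toList, "cortex:".toList, "frontier:".toList,
        "plain:".toList, "status:".toList, "briefing:".toList]
        = pmpNames.map (fun n => n ++ [':']) := by decide
    simp only [ne_eq, hneg, not_false_eq_true, if_true, hslice_to, hslice_from, hprefixes]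
    conv_lhs => rw [hdecomp]
    rw [pmp_go_names (m.take k) s hnotin pmpNames (by decide)]
    rw [← hdecomp]

-- ===== VERDICT (by name: the statement is the Claim_ definition above) =====
theorem parse_message_prefix_spec : Claim_equal_parse_message_prefix := by
  intro message _
  unfold Spec_parse_message_prefix parse_message_prefix parse_message_prefix_alt
  exact pmp_main (PySem.Chars.strip message.toList)
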